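-- pv_equiv track=rewrite | github.com/Raghavapranav3443/FlowLens_AI_Team-MCS | backend/main.py | derive_role_title
-- ===== SOURCE A (Python) =====
-- from typing import List, Dict, Optional
--
-- STAGE_ROLE = {
--     "INVOICE_SENT":     "Accounts Receivable Clerk",
--     "APPROVAL":         "Approving Authority",
--     "PAYMENT":          "Accounts Payable Officer",
--     "REFUND_INITIATED": "Finance Officer",
--     "REFUND_COMPLETED": "Finance Manager",
-- }
--
-- def derive_role_title(actor_name: str, stage_actor_map: Dict) -> str:
--     """Map a personal name to a professional role title based on stages they handle."""
--     actor_upper = actor_name.upper()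
--     # Find all stages this actor handles
--     stages_handled = [s for s, a in stage_actor_map.items() if a.upper() == actor_upper]
--     # Return the most senior role title for their stages
--     role_priority = ["APPROVAL", "PAYMENT", "REFUND_COMPLETED", "REFUND_INITIATED", "INVOICE_SENT"]
--     for s in role_priority:
--         if s in stages_handled:
--             return STAGE_ROLE.get(s, "Finance Officer")
--     return "Finance Officer"
-- ===== SOURCE B (Python) =====
-- STAGE_ROLE = {
--     "INVOICE_SENT":     "Accounts Receivable Clerk",
--     "APPROVAL":         "Approving Authority",
--     "PAYMENT":          "Accounts Payable Officer",
--     "REFUND_INITIATED": "Finance Officer",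
--     "REFUND_COMPLETED": "Finance Manager",
-- }
--
-- _RANK = {"APPROVAL": 0, "PAYMENT": 1, "REFUND_COMPLETED": 2,
--          "REFUND_INITIATED": 3, "INVOICE_SENT": 4}
-- # titles by rank; index 5 is the fallback for actors handling no ranked stage
-- _BY_RANK = ["Approving Authority", "Accounts Payable Officer", "Finance Manager",
--             "Finance Officer", "Accounts Receivable Clerk", "Finance Officer"]
--
-- def derive_role_title(actor_name: str, stage_actor_map) -> str:
--     """Map a personal name to a professional role title based on stages they handle."""
--     actor_upper = actor_name.upper()
--     best = 5
--     for s, a in stage_actor_map.items():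
--         if a.upper() == actor_upper:
--             r = _RANK.get(s, 5)
--             if r < best:
--                 best = r
--     return _BY_RANK[best]
-- ===== Notes on version B (the rewrite author's own statement) =====
-- stated objective: alternative
-- what changed: B replaces A's build-a-list-of-handled-stages plus first-match scan over the priority list by a single pass over the map keeping only the best (minimum) priority rank as an integer accumulator, then indexing a rank-to-title table once.
import Mathlib
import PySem

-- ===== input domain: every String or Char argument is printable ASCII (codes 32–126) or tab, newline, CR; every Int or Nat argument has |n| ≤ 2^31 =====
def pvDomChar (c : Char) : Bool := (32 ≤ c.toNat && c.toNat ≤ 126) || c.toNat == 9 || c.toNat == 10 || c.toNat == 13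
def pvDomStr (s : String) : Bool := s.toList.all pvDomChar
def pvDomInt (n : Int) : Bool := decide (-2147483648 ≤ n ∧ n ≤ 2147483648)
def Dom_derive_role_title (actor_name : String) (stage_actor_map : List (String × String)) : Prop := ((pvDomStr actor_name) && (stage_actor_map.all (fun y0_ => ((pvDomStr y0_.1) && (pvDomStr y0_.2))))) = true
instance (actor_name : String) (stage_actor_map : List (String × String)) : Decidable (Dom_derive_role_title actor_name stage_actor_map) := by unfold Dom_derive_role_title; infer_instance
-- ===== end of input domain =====

-- B replaces A's handled-stage list + priority scan by a single pass keeping the minimum rank.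

-- ===== PORT A =====
def pvStageRole : PySem.Dict String String := PySem.Dict.ofList
  [("INVOICE_SENT", "Accounts Receivable Clerk"),
   ("APPROVAL", "Approving Authority"),
   ("PAYMENT", "Accounts Payable Officer"),
   ("REFUND_INITIATED", "Finance Officer"),
   ("REFUND_COMPLETED", "Finance Manager")]

def derive_role_title (actor_name : String) (stage_actor_map : List (String × String)) : String :=
  let actor_upper := PySem.Str.upper actor_name
  let stages_handled := ((PySem.Dict.ofList stage_actor_map).items.filter
      (fun p => PySem.Str.upper p.2 == actor_upper)).map (·.1)
  let role_priority : List String :=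
    ["APPROVAL", "PAYMENT", "REFUND_COMPLETED", "REFUND_INITIATED", "INVOICE_SENT"]
  match role_priority.find? (fun s => stages_handled.contains s) with
  | some s => pvStageRole.getD s "Finance Officer"
  | none => "Finance Officer"

-- ===== PORT B =====
def pvRank : PySem.Dict String Int := PySem.Dict.ofList
  [("APPROVAL", 0), ("PAYMENT", 1), ("REFUND_COMPLETED", 2),
   ("REFUND_INITIATED", 3), ("INVOICE_SENT", 4)]

def pvByRank : List String :=
  ["Approving Authority", "Accounts Payable Officer", "Finance Manager",
   "Finance Officer", "Accounts Receivable Clerk", "Finance Officer"]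

def derive_role_title_alt (actor_name : String) (stage_actor_map : List (String × String)) : String :=
  let actor_upper := PySem.Str.upper actor_name
  let best := (PySem.Dict.ofList stage_actor_map).items.foldl
      (fun b p =>
        if PySem.Str.upper p.2 == actor_upper then
          if pvRank.getD p.1 5 < b then pvRank.getD p.1 5 else b
        else b) 5
  -- _BY_RANK[best]: best is always in 0..5, so the index is in range
  PySem.List.pyGetD pvByRank best "Finance Officer"

-- ===== PRECONDITION & SPEC =====
def Spec_derive_role_title (actor_name : String) (stage_actor_map : List (String × String)) (out : String) : Prop := out = derive_role_title_alt actor_name stage_actor_map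
instance (actor_name : String) (stage_actor_map : List (String × String)) (out : String) : Decidable (Spec_derive_role_title actor_name stage_actor_map out) := by unfold Spec_derive_role_title; infer_instance

-- ===== CLAIM (what is proved, stated in full; the proofs are below) =====
def Claim_equal_derive_role_title : Prop := ∀ (actor_name : String) (stage_actor_map : List (String × String)), Dom_derive_role_title actor_name stage_actor_map → Spec_derive_role_title actor_name stage_actor_map (derive_role_title actor_name stage_actor_map)

-- ===== LEMMAS AND PROOFS =====

-- minimum rank among the handled stages (5 = nothing ranked handled)
def pvChain (stages : List String) : Int :=
  if "APPROVAL" ∈ stages then 0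
  else if "PAYMENT" ∈ stages then 1
  else if "REFUND_COMPLETED" ∈ stages then 2
  else if "REFUND_INITIATED" ∈ stages then 3
  else if "INVOICE_SENT" ∈ stages then 4
  else 5

lemma pvChain_bounds (stages : List String) : 0 ≤ pvChain stages ∧ pvChain stages ≤ 5 := by
  unfold pvChain; split_ifs <;> omega

lemma pvRank_getD (s : String) : pvRank.getD s 5 =
    if s = "APPROVAL" then 0 else if s = "PAYMENT" then 1
    else if s = "REFUND_COMPLETED" then 2 else if s = "REFUND_INITIATED" then 3
    else if s = "INVOICE_SENT" then 4 else 5 := by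
  have h : pvRank = PySem.Dict.mk
      [("APPROVAL", 0), ("PAYMENT", 1), ("REFUND_COMPLETED", 2),
       ("REFUND_INITIATED", 3), ("INVOICE_SENT", 4)] := by rfl
  rw [h, PySem.Dict.getD_eq_get?_getD]
  simp only [PySem.Dict.get?_mk_cons]
  split_ifs <;> simp_all [PySem.Dict.get?]

lemma pvRank_bounds (s : String) : 0 ≤ pvRank.getD s 5 ∧ pvRank.getD s 5 ≤ 5 := by
  rw [pvRank_getD]; split_ifs <;> omega

set_option maxHeartbeats 2000000 in
lemma pvChain_cons (s : String) (rest : List String) :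
    pvChain (s :: rest) = min (pvRank.getD s 5) (pvChain rest) := by
  rw [pvRank_getD]
  unfold pvChain
  simp only [List.mem_cons]
  split_ifs <;> simp_all

lemma pvFold_stages (stages : List String) :
    ∀ b : Int, b ≤ 5 →
      stages.foldl (fun b s => if pvRank.getD s 5 < b then pvRank.getD s 5 else b) b
        = min b (pvChain stages) := by
  induction stages with
  | nil =>
      intro b hb
      simp only [List.foldl_nil, pvChain, List.not_mem_nil, if_false]
      omega
  | cons s rest ih =>
      intro b hb
      simp only [List.foldl_cons]
      rw [ih _ (by rcases pvRank_bounds s with ⟨_, h5⟩; split_ifs <;> omega)]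
      rw [pvChain_cons]
      rcases pvRank_bounds s with ⟨h0, h5⟩
      split_ifs <;> omega

-- fold over the items equals the fold over the filtered-and-projected stage list
lemma pvFold_filter (au : String) (l : List (String × String)) (b : Int) :
    l.foldl (fun b p =>
        if PySem.Str.upper p.2 == au then
          if pvRank.getD p.1 5 < b then pvRank.getD p.1 5 else b
        else b) b
    = ((l.filter (fun p => PySem.Str.upper p.2 == au)).map (·.1)).foldl
        (fun b s => if pvRank.getD s 5 < b then pvRank.getD s 5 else b) b := by
  induction l generalizing b with
  | nil => rfl
  | cons p rest ih =>
      by_cases h : (PySem.Str.upper p.2 == au) = true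
      · simp only [List.foldl_cons, List.filter_cons, h, if_true, List.map_cons]
        exact ih _
      · simp only [List.foldl_cons, List.filter_cons, h, Bool.false_eq_true, if_false]
        exact ih _

lemma pvScan_eq (stages : List String) :
    (match (["APPROVAL", "PAYMENT", "REFUND_COMPLETED", "REFUND_INITIATED",
             "INVOICE_SENT"] : List String).find? (fun s => stages.contains s) with
     | some s => pvStageRole.getD s "Finance Officer"
     | none => "Finance Officer")
    = PySem.List.pyGetD pvByRank (pvChain stages) "Finance Officer" := by
  by_cases h0 : "APPROVAL" ∈ stages <;>
  by_cases h1 : "PAYMENT" ∈ stages <;>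
  by_cases h2 : "REFUND_COMPLETED" ∈ stages <;>
  by_cases h3 : "REFUND_INITIATED" ∈ stages <;>
  by_cases h4 : "INVOICE_SENT" ∈ stages <;>
  simp [List.find?, pvChain, h0, h1, h2, h3, h4] <;> rfl

-- ===== VERDICT (by name: the statement is the Claim_ definition above) =====
theorem derive_role_title_spec : Claim_equal_derive_role_title := by
  intro actor_name stage_actor_map _
  unfold Spec_derive_role_title derive_role_title derive_role_title_alt
  dsimp only
  rw [pvFold_filter, pvFold_stages _ 5 (by omega), pvScan_eq]
  have := pvChain_bounds ((((PySem.Dict.ofList stage_actor_map).items.filter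
      (fun p => PySem.Str.upper p.2 == PySem.Str.upper actor_name)).map (·.1)))
  congr 1
  omega
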